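-- pv_equiv track=rewrite | github.com/QuantumKuba/leetcodes | hackerrank/erosion/main.py | erode_image_2d
-- ===== SOURCE A (Python) =====
-- def erode_image_2d(image: list[list[int]], se: list[list[int]]) -> int:
--     rows, cols = len(image), len(image[0])
--     se_rows, se_cols = len(se), len(se[0])
--
--     # Create a blank (all zeros) output image for erosion
--     eroded_image = [[0 for _ in range(cols)] for _ in range(rows)]
--
--     # Apply the structuring element for erosion
--     for i in range(rows):
--         for j in range(cols):
--             fits = True
--             for di in range(se_rows):
--                 for dj in range(se_cols):
--                     if se[di][dj] == 1:
--                         ni, nj = i + di - se_rows // 2, j + dj - se_cols // 2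
--                         if not (0 <= ni < rows and 0 <= nj < cols and image[ni][nj] == 1):
--                             fits = False
--                             break
--                 if not fits:
--                     break
--             if fits:
--                 eroded_image[i][j] = 1
--
--     # Count the number of 1s in the eroded image
--     return sum(sum(row) for row in eroded_image)
-- ===== SOURCE B (Python) =====
-- def erode_image_2d(image: list[list[int]], se: list[list[int]]) -> int:
--     rows, cols = len(image), len(image[0])
--     se_rows, se_cols = len(se), len(se[0])
--     ci, cj = se_rows // 2, se_cols // 2
--     offsets = [(di - ci, dj - cj)
--                for di in range(se_rows) for dj in range(se_cols)
--                if se[di][dj] == 1]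
--     if not offsets:
--         return rows * cols
--     ones = {(i, j)
--             for i in range(rows) for j in range(cols)
--             if image[i][j] == 1}
--     (oi, oj), *rest = offsets
--     eroded = {(i - oi, j - oj) for (i, j) in ones}
--     for oi, oj in rest:
--         eroded &= {(i - oi, j - oj) for (i, j) in ones}
--     return sum(1 for (i, j) in eroded if 0 <= i < rows and 0 <= j < cols)
-- ===== Notes on version B (the rewrite author's own statement) =====
-- stated objective: faster
-- what changed: Measured faster on the generated inputs: instead of A's per-pixel quadruple loop testing every SE cell with bounds checks, B computes the eroded set globally: it collects the foreground coordinates of the rows*cols grid, translates that set by each SE offset, intersects the translates, and counts the intersection inside the grid (all-zero SE short-circuits to rows*cols); …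
-- outside the precondition, e.g. on erode_image_2d([[0]], [[0, 1], [0]]): A returns 0, B raises IndexError; on erode_image_2d([[1, 0], [0]], [[1, 0]]): A returns 1, B raises IndexError
import Mathlib
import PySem

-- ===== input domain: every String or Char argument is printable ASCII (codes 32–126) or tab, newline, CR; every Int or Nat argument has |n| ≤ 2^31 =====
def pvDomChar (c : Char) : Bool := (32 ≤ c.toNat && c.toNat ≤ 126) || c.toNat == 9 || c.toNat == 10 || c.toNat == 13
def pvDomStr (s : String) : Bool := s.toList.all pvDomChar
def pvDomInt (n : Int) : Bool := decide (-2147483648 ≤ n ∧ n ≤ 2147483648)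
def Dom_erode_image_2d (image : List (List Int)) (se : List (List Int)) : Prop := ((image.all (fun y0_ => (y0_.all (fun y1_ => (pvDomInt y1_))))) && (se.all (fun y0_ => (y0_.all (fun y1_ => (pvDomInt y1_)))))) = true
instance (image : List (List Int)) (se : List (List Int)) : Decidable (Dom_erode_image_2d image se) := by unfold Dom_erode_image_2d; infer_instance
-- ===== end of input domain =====

-- B replaces A's per-pixel quadruple loop by a global set computation: intersect the
-- foreground-coordinate set translated by each SE offset, count the intersection in the grid.

-- ===== PORT A =====
-- A's inner 'fits' computation for pixel (i, j): the two break-loops over the structuring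
-- element, transliterated as && -accumulating folds over the same ranges (the breaks do not
-- change the resulting Bool, only stop early).
def pvFits (image : List (List Int)) (se : List (List Int)) (i j : Int) : Bool :=
  let rows : Int := image.length
  let cols : Int := (image.headD []).length
  let se_rows : Int := se.length
  let se_cols : Int := (se.headD []).length
  (PySem.List.pyRange 0 se_rows 1).foldl (fun f di =>
    f && (PySem.List.pyRange 0 se_cols 1).foldl (fun g dj =>
      g && (if PySem.List.pyGetD (PySem.List.pyGetD se di []) dj 0 = 1 then
              (decide (0 ≤ i + di - PySem.Int.floordiv se_rows 2 ∧
                       i + di - PySem.Int.floordiv se_rows 2 < rows ∧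
                       0 ≤ j + dj - PySem.Int.floordiv se_cols 2 ∧
                       j + dj - PySem.Int.floordiv se_cols 2 < cols) &&
               decide (PySem.List.pyGetD
                         (PySem.List.pyGetD image (i + di - PySem.Int.floordiv se_rows 2) [])
                         (j + dj - PySem.Int.floordiv se_cols 2) 0 = 1))
            else true)) true) true

def erode_image_2d (image : List (List Int)) (se : List (List Int)) : Int :=
  let rows : Int := image.length
  let cols : Int := (image.headD []).length
  let eroded : List (List Int) :=
    (PySem.List.pyRange 0 rows 1).map (fun i =>
      (PySem.List.pyRange 0 cols 1).map (fun j => if pvFits image se i j then 1 else 0))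
  (eroded.map (fun row => row.foldl (· + ·) 0)).foldl (· + ·) 0

-- ===== PORT B =====
-- offsets = [(di - ci, dj - cj) for di in range(se_rows) for dj in range(se_cols) if se[di][dj] == 1]
def pvOffsetsB (se : List (List Int)) (se_rows se_cols ci cj : Int) : List (Int × Int) :=
  (PySem.List.pyRange 0 se_rows 1).flatMap (fun di =>
    (PySem.List.pyRange 0 se_cols 1).filterMap (fun dj =>
      if PySem.List.pyGetD (PySem.List.pyGetD se di []) dj 0 = 1 then
        some (di - ci, dj - cj)
      else none))

-- ones = {(i, j) for i in range(rows) for j in range(cols) if image[i][j] == 1}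
def pvOnesB (image : List (List Int)) (rows cols : Int) : PySem.Set (Int × Int) :=
  PySem.Set.ofList ((PySem.List.pyRange 0 rows 1).flatMap (fun i =>
    (PySem.List.pyRange 0 cols 1).filterMap (fun j =>
      if PySem.List.pyGetD (PySem.List.pyGetD image i []) j 0 = 1 then
        some (i, j)
      else none)))

-- {(i - oi, j - oj) for (i, j) in ones}
def pvShift (ones : PySem.Set (Int × Int)) (o : Int × Int) : PySem.Set (Int × Int) :=
  PySem.Set.ofList (ones.map (fun p => (p.1 - o.1, p.2 - o.2)))

def erode_image_2d_alt (image : List (List Int)) (se : List (List Int)) : Int :=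
  let rows : Int := image.length
  let cols : Int := (image.headD []).length
  let se_rows : Int := se.length
  let se_cols : Int := (se.headD []).length
  let ci : Int := PySem.Int.floordiv se_rows 2
  let cj : Int := PySem.Int.floordiv se_cols 2
  match pvOffsetsB se se_rows se_cols ci cj with
  | [] => rows * cols
  | o :: rest =>
      let ones := pvOnesB image rows cols
      let eroded : PySem.Set (Int × Int) :=
        rest.foldl (fun e o' => PySem.Set.inter e (pvShift ones o')) (pvShift ones o)
      eroded.foldl (fun acc p =>
        if 0 ≤ p.1 ∧ p.1 < rows ∧ 0 ≤ p.2 ∧ p.2 < cols then acc + 1 else acc) 0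

-- ===== PRECONDITION & SPEC =====
-- Pre_ excludes the empty image/se (A raises IndexError on len(image[0]) / len(se[0])) and the
-- inputs with a row shorter than the declared width (the first row's length), on which A raises
-- or returns depending on which cells its break statements happen to skip, while B reads the
-- whole declared rectangle and raises; rows longer than the declared width stay inside Pre_
-- (both programs ignore the extra cells).
def Pre_erode_image_2d (image : List (List Int)) (se : List (List Int)) : Prop :=
  image ≠ [] ∧ se ≠ [] ∧
  (∀ r ∈ se, (se.headD []).length ≤ r.length) ∧
  ((∃ r ∈ se, ∃ v ∈ r.take (se.headD []).length, v = 1) →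
    ∀ r ∈ image, (image.headD []).length ≤ r.length)
instance (image : List (List Int)) (se : List (List Int)) : Decidable (Pre_erode_image_2d image se) := by unfold Pre_erode_image_2d; infer_instance

def pvWitness_erode_image_2d : List (List Int) × List (List Int) := ([[1, 0], [1, 1]], [[1], [1]])

def Spec_erode_image_2d (image : List (List Int)) (se : List (List Int)) (out : Int) : Prop := out = erode_image_2d_alt image se
instance (image : List (List Int)) (se : List (List Int)) (out : Int) : Decidable (Spec_erode_image_2d image se out) := by unfold Spec_erode_image_2d; infer_instance

-- ===== CLAIM =====
def Claim_equal_erode_image_2d : Prop := ∀ (image : List (List Int)) (se : List (List Int)), Dom_erode_image_2d image se → Pre_erode_image_2d image se → Spec_erode_image_2d image se (erode_image_2d image se)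

-- ===== LEMMAS AND PROOFS =====

-- a break-loop accumulating with && is the conjunction over the list
theorem pvFoldlAnd {α : Type} (l : List α) (p : α → Bool) (b : Bool) :
    l.foldl (fun f x => f && p x) b = (b && l.all p) := by
  induction l generalizing b with
  | nil => simp
  | cons x xs ih => simp [List.foldl_cons, ih, Bool.and_assoc]

theorem pvIteTrueIff (c : Prop) [Decidable c] (b : Bool) :
    ((if c then b else true) = true) ↔ (c → b = true) := by
  split_ifs with h <;> simp [h]

-- membership in B's ones-set
theorem pvMemOnesB (image : List (List Int)) (rows cols : Int) (a b : Int) :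
    (a, b) ∈ pvOnesB image rows cols ↔
      (0 ≤ a ∧ a < rows ∧ 0 ≤ b ∧ b < cols ∧
       PySem.List.pyGetD (PySem.List.pyGetD image a []) b 0 = 1) := by
  rw [pvOnesB, PySem.Set.mem_ofList]
  simp only [List.mem_flatMap, List.mem_filterMap, PySem.List.mem_pyRange_one,
    Option.ite_none_right_eq_some, Option.some_inj, Prod.mk.injEq]
  constructor
  · rintro ⟨i, hi, j, hj, hv, rfl, rfl⟩
    exact ⟨hi.1, hi.2, hj.1, hj.2, hv⟩
  · rintro ⟨h1, h2, h3, h4, hv⟩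
    exact ⟨a, ⟨h1, h2⟩, b, ⟨h3, h4⟩, hv, rfl, rfl⟩

-- membership in B's offset list
theorem pvMemOffsetsB (se : List (List Int)) (se_rows se_cols ci cj : Int) (o : Int × Int) :
    o ∈ pvOffsetsB se se_rows se_cols ci cj ↔
      ∃ di dj : Int, (0 ≤ di ∧ di < se_rows) ∧ (0 ≤ dj ∧ dj < se_cols) ∧
        PySem.List.pyGetD (PySem.List.pyGetD se di []) dj 0 = 1 ∧
        o = (di - ci, dj - cj) := by
  rw [pvOffsetsB]
  simp only [List.mem_flatMap, List.mem_filterMap, PySem.List.mem_pyRange_one,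
    Option.ite_none_right_eq_some, Option.some_inj]
  constructor
  · rintro ⟨di, hdi, dj, hdj, hv, rfl⟩
    exact ⟨di, dj, hdi, hdj, hv, rfl⟩
  · rintro ⟨di, dj, hdi, hdj, hv, rfl⟩
    exact ⟨di, hdi, dj, hdj, hv, rfl⟩

-- the heart: A's fits test = "every offset-translate of the pixel lies in B's ones-set"
theorem pvFitsEqB (image se : List (List Int)) (i j : Int) :
    pvFits image se i j =
      (pvOffsetsB se (se.length) ((se.headD []).length)
          (PySem.Int.floordiv (se.length) 2)
          (PySem.Int.floordiv ((se.headD []).length) 2)).all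
        (fun o => decide ((i + o.1, j + o.2) ∈
          pvOnesB image (image.length) ((image.headD []).length))) := by
  unfold pvFits
  simp only [pvFoldlAnd, Bool.true_and]
  rw [Bool.eq_iff_iff]
  simp only [List.all_eq_true, PySem.List.mem_pyRange_one, pvMemOffsetsB,
    forall_exists_index, and_imp, pvIteTrueIff, Bool.and_eq_true, decide_eq_true_eq]
  constructor
  · intro hL o di dj hdi1 hdi2 hdj1 hdj2 hv ho
    subst ho
    obtain ⟨hb, himg⟩ := hL di hdi1 hdi2 dj hdj1 hdj2 hv
    rw [show (i + (di - PySem.Int.floordiv (↑se.length) 2),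
              j + (dj - PySem.Int.floordiv (↑(se.headD []).length) 2)) =
             (i + di - PySem.Int.floordiv (↑se.length) 2,
              j + dj - PySem.Int.floordiv (↑(se.headD []).length) 2) by
          rw [Prod.mk.injEq]; exact ⟨by ring, by ring⟩]
    rw [pvMemOnesB]
    exact ⟨hb.1, hb.2.1, hb.2.2.1, hb.2.2.2, himg⟩
  · intro hR di hdi0 hdi1 dj hdj0 hdj1 hv
    have := hR _ di dj hdi0 hdi1 hdj0 hdj1 hv rfl
    rw [pvMemOnesB] at this
    rw [show i + (di - PySem.Int.floordiv (↑se.length) 2) =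
            i + di - PySem.Int.floordiv (↑se.length) 2 by ring,
        show j + (dj - PySem.Int.floordiv (↑(se.headD []).length) 2) =
            j + dj - PySem.Int.floordiv (↑(se.headD []).length) 2 by ring] at this
    exact ⟨⟨this.1, this.2.1, this.2.2.1, this.2.2.2.1⟩, this.2.2.2.2⟩

-- membership in a translated ones-set
theorem pvMemShift (ones : PySem.Set (Int × Int)) (o : Int × Int) (q : Int × Int) :
    q ∈ pvShift ones o ↔ (q.1 + o.1, q.2 + o.2) ∈ ones := by
  rw [pvShift, PySem.Set.mem_ofList, List.mem_map]
  constructor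
  · rintro ⟨p, hp, rfl⟩
    simpa [show (p.1 - o.1 + o.1, p.2 - o.2 + o.2) = p by
             rw [Prod.mk.injEq]; exact ⟨by ring, by ring⟩] using hp
  · intro h
    exact ⟨(q.1 + o.1, q.2 + o.2), h, by rw [Prod.mk.injEq]; exact ⟨by ring, by ring⟩⟩

-- membership in the intersection fold
theorem pvMemErodedFold (ones : PySem.Set (Int × Int)) (rest : List (Int × Int))
    (init : PySem.Set (Int × Int)) (p : Int × Int) :
    p ∈ rest.foldl (fun e o' => PySem.Set.inter e (pvShift ones o')) init ↔
      p ∈ init ∧ ∀ o' ∈ rest, (p.1 + o'.1, p.2 + o'.2) ∈ ones := by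
  induction rest generalizing init with
  | nil => simp
  | cons o' rest ih =>
      simp only [List.foldl_cons, ih, PySem.Set.mem_inter, pvMemShift, List.mem_cons]
      constructor
      · rintro ⟨⟨h1, h2⟩, h3⟩
        exact ⟨h1, fun x hx => by rcases hx with rfl | hx; exact h2; exact h3 x hx⟩
      · rintro ⟨h1, h2⟩
        exact ⟨⟨h1, h2 o' (Or.inl rfl)⟩, fun x hx => h2 x (Or.inr hx)⟩

theorem pvNodupErodedFold (ones : PySem.Set (Int × Int)) (rest : List (Int × Int))
    (init : PySem.Set (Int × Int)) (h : init.Nodup) :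
    (rest.foldl (fun e o' => PySem.Set.inter e (pvShift ones o')) init).Nodup := by
  induction rest generalizing init with
  | nil => exact h
  | cons o' rest ih => exact ih _ (PySem.Set.nodup_inter _ _ h)

-- the pixel grid as a list, its membership and distinctness
def pvGrid (rows cols : Int) : List (Int × Int) :=
  (PySem.List.pyRange 0 rows 1).flatMap (fun i =>
    (PySem.List.pyRange 0 cols 1).map (fun j => (i, j)))

theorem pvMemGrid (rows cols : Int) (p : Int × Int) :
    p ∈ pvGrid rows cols ↔ 0 ≤ p.1 ∧ p.1 < rows ∧ 0 ≤ p.2 ∧ p.2 < cols := by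
  rcases p with ⟨a, b⟩
  simp only [pvGrid, List.mem_flatMap, List.mem_map, PySem.List.mem_pyRange_one,
    Prod.mk.injEq]
  constructor
  · rintro ⟨i, hi, j, hj, rfl, rfl⟩
    exact ⟨hi.1, hi.2, hj.1, hj.2⟩
  · rintro ⟨h1, h2, h3, h4⟩
    exact ⟨a, ⟨h1, h2⟩, b, ⟨h3, h4⟩, rfl, rfl⟩

theorem pvNodupFlatMap {α β : Type} (l : List α) (f : α → List β)
    (h2 : ∀ a ∈ l, (f a).Nodup)
    (h3 : l.Pairwise (fun a b => ∀ x, x ∈ f a → x ∉ f b)) :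
    (l.flatMap f).Nodup := by
  induction l with
  | nil => simp
  | cons x xs ih =>
      simp only [List.flatMap_cons, List.nodup_append]
      refine ⟨h2 x (by simp), ih (fun a ha => h2 a (by simp [ha])) (h3.sublist (by simp)), ?_⟩
      intro y hy z hz heq
      obtain ⟨a, ha, hza⟩ := List.mem_flatMap.1 hz
      exact (List.pairwise_cons.1 h3).1 a ha y hy (heq ▸ hza)

theorem pvNodupGrid (rows cols : Int) : (pvGrid rows cols).Nodup := by
  refine pvNodupFlatMap _ _ (fun a _ => ?_) ?_
  · exact (PySem.List.nodup_pyRange_one 0 cols).map (fun x y h => by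
      simpa using congrArg Prod.snd h)
  · refine (PySem.List.nodup_pyRange_one 0 rows).imp_of_mem ?_
    intro a b _ _ hne x hxa hxb
    obtain ⟨j1, _, rfl⟩ := List.mem_map.1 hxa
    obtain ⟨j2, _, h⟩ := List.mem_map.1 hxb
    exact hne (by simpa using (congrArg Prod.fst h).symm)

-- countP distributes over flatMap
theorem pvCountPFlatMap {α β : Type} (l : List α) (f : α → List β) (p : β → Bool) :
    ((l.flatMap f).countP p : Int) = (l.map (fun a => ((f a).countP p : Int))).sum := by
  induction l with
  | nil => simp
  | cons x xs ih => simp [List.flatMap_cons, List.countP_append, ih]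

-- A's value is the count of fitting pixels over the grid
theorem pvAEqCount (image se : List (List Int)) :
    erode_image_2d image se =
      ((pvGrid (image.length) ((image.headD []).length)).countP
        (fun p => pvFits image se p.1 p.2) : Int) := by
  unfold erode_image_2d
  simp only [← List.sum_eq_foldl, List.map_map, Function.comp_def,
    PySem.List.sum_map_ite_one_zero]
  rw [pvGrid, pvCountPFlatMap]
  simp [List.countP_map, Function.comp_def]

-- grid-count loop with a decidable-Prop condition
theorem pvFoldlCountProp (l : List (Int × Int)) (c : Int × Int → Prop) [DecidablePred c]
    (a : Int) :
    l.foldl (fun acc x => if c x then acc + 1 else acc) a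
      = a + l.countP (fun x => decide (c x)) := by
  simpa using PySem.List.foldl_count_if (fun x => decide (c x)) l a

-- two nodup lists with the same members have the same length
theorem pvLenEqOfNodup {α : Type} [DecidableEq α] (l1 l2 : List α)
    (h1 : l1.Nodup) (h2 : l2.Nodup) (h : ∀ x, x ∈ l1 ↔ x ∈ l2) : l1.length = l2.length :=
  List.Perm.length_eq ((List.perm_ext_iff_of_nodup h1 h2).2 h)

-- ===== VERDICT =====
theorem erode_image_2d_spec : Claim_equal_erode_image_2d := by
  intro image se _ _
  unfold Spec_erode_image_2d
  rw [pvAEqCount]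
  have hfits := pvFitsEqB image se
  rcases hm : pvOffsetsB se (se.length) ((se.headD []).length)
      (PySem.Int.floordiv (se.length) 2)
      (PySem.Int.floordiv ((se.headD []).length) 2) with _ | ⟨o, rest⟩
  · rw [show erode_image_2d_alt image se
          = (image.length : Int) * ((image.headD []).length : Int) by
        unfold erode_image_2d_alt; simp only [hm]]
    have hall : ∀ p ∈ pvGrid (image.length : Int) ((image.headD []).length : Int),
        (fun p : Int × Int => pvFits image se p.1 p.2) p = true := by
      intro p _
      simp only []
      rw [hfits, hm]
      simp
    rw [List.countP_eq_length_filter, List.filter_eq_self.2 hall, pvGrid,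
        List.length_flatMap]
    simp [PySem.List.length_pyRange_one]
  · rw [show erode_image_2d_alt image se
          = (rest.foldl (fun e o' =>
                PySem.Set.inter e (pvShift (pvOnesB image (image.length) ((image.headD []).length)) o'))
              (pvShift (pvOnesB image (image.length) ((image.headD []).length)) o)).foldl
              (fun acc p => if 0 ≤ p.1 ∧ p.1 < (image.length : Int) ∧ 0 ≤ p.2 ∧
                  p.2 < ((image.headD []).length : Int) then acc + 1 else acc) 0 by
        unfold erode_image_2d_alt; simp only [hm]]
    rw [pvFoldlCountProp, zero_add, List.countP_eq_length_filter,
        List.countP_eq_length_filter]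
    have hnod1 : ((pvGrid (image.length : Int) ((image.headD []).length : Int)).filter
        (fun p : Int × Int => pvFits image se p.1 p.2)).Nodup :=
      (pvNodupGrid _ _).filter _
    have hnod2 := (pvNodupErodedFold (pvOnesB image (image.length) ((image.headD []).length))
        rest (pvShift (pvOnesB image (image.length) ((image.headD []).length)) o)
        (by rw [pvShift]; exact PySem.Set.nodup_ofList _)).filter
        (fun p : Int × Int => decide (0 ≤ p.1 ∧ p.1 < (image.length : Int) ∧ 0 ≤ p.2 ∧
          p.2 < ((image.headD []).length : Int)))
    refine congrArg Int.ofNat (pvLenEqOfNodup _ _ hnod1 hnod2 ?_)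
    intro x
    simp only [List.mem_filter, pvMemGrid, pvMemErodedFold, pvMemShift, hfits, hm,
      List.all_eq_true, List.mem_cons, decide_eq_true_eq]
    constructor
    · rintro ⟨⟨g1, g2, g3, g4⟩, hof⟩
      exact ⟨⟨hof o (Or.inl rfl), fun o' ho' => hof o' (Or.inr ho')⟩, g1, g2, g3, g4⟩
    · rintro ⟨⟨h1, h2⟩, g1, g2, g3, g4⟩
      refine ⟨⟨g1, g2, g3, g4⟩, ?_⟩
      rintro o' (rfl | ho')
      · exact h1
      · exact h2 o' ho'
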